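-- pv_equiv track=rewrite | github.com/uralik/mode_recovery | run_experiment.py | get_seq_id
-- ===== SOURCE A (Python) =====
-- def get_seq_id(seq: list, config):
--     """
--     expected format : [..., EOS]
--     """
--
--     seq = seq[:-1]
--     seq_length = len(seq)
--     if seq_length == 0:
--         return 0
--
--     position = 0
--     for base, token in enumerate(reversed(seq)):
--         position += token * ((config['vocab_size']-1)**base)  # config['vocab_size']-1 since EOS is not in cart product
--         if token == config['pad_token_id']:
--             raise Exception('PAD is not allowed to appear in the sequence!')
--
--     for length in range(0, seq_length):
--         position += (config['vocab_size']-1)**length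
--
--     if position >= config['space_num_seqs']:
--         raise Exception('position can not go beyond seq space!')
--
--     return position
-- ===== SOURCE B (Python) =====
-- def get_seq_id(seq: list, config):
--     """
--     expected format : [..., EOS]
--     """
--     seq = seq[:-1]
--     if len(seq) == 0:
--         return 0
--
--     base = config['vocab_size'] - 1
--     pad = config['pad_token_id']
--     position = 0   # Horner value of the tokens
--     offset = 0     # geometric offset 1 + base + ... built incrementally
--     power = 1
--     for token in seq:
--         if token == pad:
--             raise Exception('PAD is not allowed to appear in the sequence!')
--         position = position * base + token
--         offset += power
--         power *= base
--
--     position += offset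
--     if position >= config['space_num_seqs']:
--         raise Exception('position can not go beyond seq space!')
--
--     return position
-- ===== Notes on version B (the rewrite author's own statement) =====
-- stated objective: simpler
-- what changed: A's explicit-power loop over the reversed sequence plus a second range loop of powers are replaced by one forward Horner pass that simultaneously accumulates the geometric offset via an incremental power variable.
import Mathlib
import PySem

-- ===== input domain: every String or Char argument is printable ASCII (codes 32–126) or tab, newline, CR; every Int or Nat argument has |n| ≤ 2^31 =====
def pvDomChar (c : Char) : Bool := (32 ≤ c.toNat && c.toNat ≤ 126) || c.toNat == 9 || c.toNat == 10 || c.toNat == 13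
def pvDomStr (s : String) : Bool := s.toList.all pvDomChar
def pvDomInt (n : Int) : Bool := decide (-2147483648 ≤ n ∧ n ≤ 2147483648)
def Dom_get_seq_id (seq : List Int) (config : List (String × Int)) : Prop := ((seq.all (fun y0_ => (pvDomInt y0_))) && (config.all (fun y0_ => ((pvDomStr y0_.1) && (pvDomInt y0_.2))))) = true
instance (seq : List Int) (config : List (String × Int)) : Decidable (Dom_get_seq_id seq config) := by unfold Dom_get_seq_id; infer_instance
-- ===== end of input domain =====

-- B replaces A's explicit-power loop over the reversed sequence plus a second range loop by a single
-- forward Horner pass that also accumulates the geometric offset incrementally (objective: simpler, one pass).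

-- config[k] as first-match association-list lookup; the default 0 is only reached on a KeyError, excluded by Pre_.
def pvCfgGet (config : List (String × Int)) (k : String) : Int :=
  ((config.find? (fun p => p.1 == k)).map Prod.snd).getD 0

-- ===== PORT A =====
def get_seq_id (seq : List Int) (config : List (String × Int)) : Int :=
  let s := PySem.List.slice seq none (some (-1))          -- seq = seq[:-1]
  let seq_length := s.length
  if seq_length = 0 then 0
  else
    -- for base, token in enumerate(reversed(seq)): position += token * ((vocab_size-1)**base)
    -- (the PAD raise is outside Pre_, so it is not modelled)
    let position : Int := (PySem.List.enumerate s.reverse).foldl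
      (fun position p => position + p.2 * (pvCfgGet config "vocab_size" - 1) ^ p.1.toNat) 0
    -- for length in range(0, seq_length): position += (vocab_size-1)**length
    let position := (PySem.List.pyRange 0 (seq_length : Int) 1).foldl
      (fun position length => position + (pvCfgGet config "vocab_size" - 1) ^ length.toNat) position
    -- the 'position >= space_num_seqs' raise is outside Pre_
    position

-- ===== PORT B =====
def get_seq_id_alt (seq : List Int) (config : List (String × Int)) : Int :=
  let s := PySem.List.slice seq none (some (-1))          -- seq = seq[:-1]
  if s.length = 0 then 0
  else
    let base := pvCfgGet config "vocab_size" - 1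
    -- single forward pass: Horner value, geometric offset, running power (raises are outside Pre_)
    let st := s.foldl
      (fun (st : Int × Int × Int) token => (st.1 * base + token, st.2.1 + st.2.2, st.2.2 * base))
      (0, 0, 1)
    st.1 + st.2.1

-- ===== PRECONDITION & SPEC =====
-- closed-form value of the position A computes: each kept token contributes (token+1)·(vocab_size-1)^(places to its right)
def pvSeqVal (b : Int) : List Int → Int
  | [] => 0
  | t :: r => (t + 1) * b ^ r.length + pvSeqVal b r

-- Pre_ excludes exactly the inputs where A raises: a missing config key (KeyError), a PAD token in
-- seq[:-1], or a position reaching space_num_seqs (both explicit raises); A returns on everything else.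
def Pre_get_seq_id (seq : List Int) (config : List (String × Int)) : Prop :=
  seq.length ≤ 1 ∨
    ((config.find? (fun p => p.1 == "vocab_size")).isSome ∧
     (config.find? (fun p => p.1 == "pad_token_id")).isSome ∧
     (config.find? (fun p => p.1 == "space_num_seqs")).isSome ∧
     (∀ t ∈ seq.dropLast, t ≠ pvCfgGet config "pad_token_id") ∧
     pvSeqVal (pvCfgGet config "vocab_size" - 1) seq.dropLast < pvCfgGet config "space_num_seqs")

instance (seq : List Int) (config : List (String × Int)) : Decidable (Pre_get_seq_id seq config) := by
  unfold Pre_get_seq_id; infer_instance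

def pvWitness_get_seq_id : List Int × (List (String × Int)) :=
  ([1, 2, 0], [("vocab_size", 5), ("pad_token_id", 0), ("space_num_seqs", 100)])

def Spec_get_seq_id (seq : List Int) (config : List (String × Int)) (out : Int) : Prop := out = get_seq_id_alt seq config
instance (seq : List Int) (config : List (String × Int)) (out : Int) : Decidable (Spec_get_seq_id seq config out) := by unfold Spec_get_seq_id; infer_instance

-- ===== CLAIM (what is proved, stated in full; the proofs are below) =====
def Claim_equal_get_seq_id : Prop := ∀ (seq : List Int) (config : List (String × Int)), Dom_get_seq_id seq config → Pre_get_seq_id seq config → Spec_get_seq_id seq config (get_seq_id seq config)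

-- ===== LEMMAS AND PROOFS =====

-- Σ tokens·b^(reverse index), by decreasing powers
def pvH (b : Int) : List Int → Int
  | [] => 0
  | t :: r => t * b ^ r.length + pvH b r

-- Σ_{k<n} b^k
def pvG (b : Int) : Nat → Int
  | 0 => 0
  | n + 1 => pvG b n + b ^ n

theorem pvG_succ_eq (b : Int) (n : Nat) : pvG b (n + 1) = 1 + b * pvG b n := by
  induction n with
  | zero => simp [pvG]
  | succ n ih =>
    calc pvG b (n + 2) = pvG b (n + 1) + b ^ (n + 1) := rfl
    _ = 1 + b * pvG b n + b * b ^ n := by rw [ih]; ring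
    _ = 1 + b * pvG b (n + 1) := by simp [pvG]; ring

-- A's first loop (over enumerate(reversed(seq)))
theorem pvA_loop1 (b : Int) (xs : List Int) (a : Int) :
    (PySem.List.enumerate xs).foldl (fun position p => position + p.2 * b ^ p.1.toNat) a
      = a + pvH b xs.reverse := by
  induction xs using List.reverseRecOn generalizing a with
  | nil => simp [PySem.List.enumerate, pvH]
  | append_singleton xs x ih =>
    rw [PySem.List.enumerate_append, List.foldl_append, ih]
    simp [PySem.List.enumerate, pvH]
    ring

-- A's second loop (over range(0, seq_length))
theorem pvA_loop2 (b : Int) (n : Nat) (a : Int) :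
    (PySem.List.pyRange 0 (n : Int) 1).foldl (fun position l => position + b ^ l.toNat) a
      = a + pvG b n := by
  induction n generalizing a with
  | zero => simp [PySem.List.pyRange_one_eq_nil, pvG]
  | succ n ih =>
    rw [show ((n + 1 : Nat) : Int) = (n : Int) + 1 by push_cast; ring,
      PySem.List.pyRange_one_succ_right (by positivity), List.foldl_append, ih]
    simp [pvG]
    ring

-- B's single pass: full state invariant
theorem pvB_loop (b : Int) (s : List Int) (p off pw : Int) :
    s.foldl (fun (st : Int × Int × Int) token =>
        (st.1 * b + token, st.2.1 + st.2.2, st.2.2 * b)) (p, off, pw)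
      = (p * b ^ s.length + pvH b s, off + pw * pvG b s.length, pw * b ^ s.length) := by
  induction s generalizing p off pw with
  | nil => simp [pvH, pvG]
  | cons t r ih =>
    simp only [List.foldl_cons, ih, pvH, List.length_cons, pvG_succ_eq]
    refine Prod.ext ?_ (Prod.ext ?_ ?_) <;> simp <;> ring

-- ===== VERDICT (by name: the statement is the Claim_ definition above) =====
theorem get_seq_id_spec : Claim_equal_get_seq_id := by
  intro seq config _dom _pre
  unfold Spec_get_seq_id get_seq_id get_seq_id_alt
  simp only [PySem.List.slice_to_neg_one]
  set s := seq.dropLast with hs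
  by_cases h : s.length = 0
  · simp [h]
  · simp only [h, if_false]
    rw [pvA_loop1, pvA_loop2, pvB_loop]
    simp only [List.reverse_reverse]
    ring
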